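-- pv_equiv track=rewrite | github.com/HyungJunYang-Noah/hwp | hwp/scripts/markdown_to_payload.py | strip_links
-- ===== SOURCE A (Python) =====
-- def strip_links(text: str) -> str:
--     result: list[str] = []
--     i = 0
--     while i < len(text):
--         if text[i] == "[":
--             label_end = text.find("](", i)
--             if label_end != -1:
--                 depth = 1
--                 j = label_end + 2
--                 while j < len(text) and depth > 0:
--                     if text[j] == "(":
--                         depth += 1
--                     elif text[j] == ")":
--                         depth -= 1
--                     j += 1
--                 if depth == 0:
--                     result.append(text[i + 1 : label_end])
--                     i = j
--                     continue
--         result.append(text[i])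
--         i += 1
--     return "".join(result)
-- ===== SOURCE B (Python) =====
-- def strip_links(text: str) -> str:
--     n = len(text)
--     # nxt[p] = smallest q >= p with text[q:q+2] == "](", else None
--     nxt = [None] * (n + 1)
--     for p in reversed(range(n)):
--         nxt[p] = p if text[p:p+2] == "](" else nxt[p + 1]
--     # f[p] = index of the first ')' at position >= p that is unmatched within text[p:]
--     f = [None] * (n + 1)
--     for p in reversed(range(n)):
--         c = text[p]
--         if c == ')':
--             f[p] = p
--         elif c == '(':
--             k = f[p + 1]
--             f[p] = f[k + 1] if k is not None else None
--         else:
--             f[p] = f[p + 1]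
--     out = []
--     i = 0
--     while i < n:
--         le = nxt[i] if text[i] == '[' else None
--         m = f[le + 2] if le is not None else None
--         if m is not None:
--             out.append(text[i + 1:le])
--             i = m + 1
--         else:
--             out.append(text[i])
--             i += 1
--     return "".join(out)
-- ===== Notes on version B (the rewrite author's own statement) =====
-- stated objective: alternative
-- what changed: A rescans with str.find and a fresh paren-depth loop at every '['; B instead precomputes, in two right-to-left passes, a next-"](" table and a first-unmatched-')' table, then resolves each bracket by two table lookups in a single forward pass (worst-case linear rather than quadratic, though not measurably faster on the generated inputs).
import Mathlib
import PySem

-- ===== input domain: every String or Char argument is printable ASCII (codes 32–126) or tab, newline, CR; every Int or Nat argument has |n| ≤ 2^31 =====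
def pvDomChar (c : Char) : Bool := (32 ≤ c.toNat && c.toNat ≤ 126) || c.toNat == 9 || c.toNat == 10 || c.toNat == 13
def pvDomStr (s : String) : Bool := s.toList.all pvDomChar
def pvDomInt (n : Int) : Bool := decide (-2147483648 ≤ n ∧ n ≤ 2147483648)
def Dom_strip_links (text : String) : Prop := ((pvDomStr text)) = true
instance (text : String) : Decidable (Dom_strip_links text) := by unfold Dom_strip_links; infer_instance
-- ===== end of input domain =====

-- B replaces A's per-bracket rescans (str.find + a depth loop) by two tables built
-- right-to-left in one pass each (next "](" occurrence, first unmatched ')'), so each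
-- bracket is resolved by two table lookups; objective: alternative algorithm.

-- ===== PORT A =====
-- exact port of text.find("](", i): smallest q ≥ i with text[q:q+2] = "](", none = -1
def findJB (cs : List Char) (q : Nat) : Option Nat :=
  if h : q + 1 < cs.length then
    if cs[q]! = ']' ∧ cs[q+1]! = '(' then some q
    else findJB cs (q+1)
  else none
termination_by cs.length - q

-- A's inner while loop: returns the final (j, depth)
def depthLoop (cs : List Char) (j : Nat) (depth : Int) : Nat × Int :=
  if h : j < cs.length ∧ 0 < depth then
    depthLoop cs (j+1)
      (if cs[j]! = '(' then depth + 1 else if cs[j]! = ')' then depth - 1 else depth)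
  else (j, depth)
termination_by cs.length - j
decreasing_by omega

-- A's outer while loop; fuel is only a totality guard (i rises each step, cs.length steps suffice)
def aLoop (cs : List Char) : Nat → Nat → List Char → List Char
  | 0, _, acc => acc
  | fuel+1, i, acc =>
    if i < cs.length then
      if cs[i]! = '[' then
        match findJB cs i with
        | some le =>
          let p := depthLoop cs (le+2) 1
          if p.2 = 0 then aLoop cs fuel p.1 (acc ++ (cs.drop (i+1)).take (le - (i+1)))
          else aLoop cs fuel (i+1) (acc ++ [cs[i]!])
        | none => aLoop cs fuel (i+1) (acc ++ [cs[i]!])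
      else aLoop cs fuel (i+1) (acc ++ [cs[i]!])
    else acc

def strip_links (text : String) : String :=
  String.ofList (aLoop text.toList text.toList.length 0 [])

-- ===== PORT B =====
-- value assigned to f[p] in Source B's second loop (reads only entries above p)
def rhsF (cs : List Char) (a : List (Option Nat)) (p : Nat) : Option Nat :=
  if cs[p]! = ')' then some p
  else if cs[p]! = '(' then
    (match a[p+1]! with
     | some k => a[k+1]!
     | none => none)
  else a[p+1]!

-- Source B's table `nxt`: the loop `for p in reversed(range(n))` with list assignment
def bNxt (cs : List Char) : List (Option Nat) :=
  ((List.range cs.length).reverse).foldl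
    (fun a p => a.set p (if (cs.drop p).take 2 = [']', '('] then some p else a[p+1]!))
    (List.replicate (cs.length + 1) none)

-- Source B's table `f`
def bF (cs : List Char) : List (Option Nat) :=
  ((List.range cs.length).reverse).foldl
    (fun a p => a.set p (rhsF cs a p))
    (List.replicate (cs.length + 1) none)

-- Source B's main while loop; fuel is only a totality guard (cs.length steps suffice)
def bLoop (cs : List Char) (nxt f : List (Option Nat)) : Nat → Nat → List Char → List Char
  | 0, _, out => out
  | fuel+1, i, out =>
    if i < cs.length then
      match (if cs[i]! = '[' then nxt[i]! else none) with
      | some le =>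
        match f[le+2]! with
        | some m => bLoop cs nxt f fuel (m+1) (out ++ (cs.drop (i+1)).take (le - (i+1)))
        | none => bLoop cs nxt f fuel (i+1) (out ++ [cs[i]!])
      | none => bLoop cs nxt f fuel (i+1) (out ++ [cs[i]!])
    else out

def strip_links_alt (text : String) : String :=
  let cs := text.toList
  String.ofList (bLoop cs (bNxt cs) (bF cs) cs.length 0 [])

-- ===== PRECONDITION & SPEC =====
def Spec_strip_links (text : String) (out : String) : Prop := out = strip_links_alt text
instance (text : String) (out : String) : Decidable (Spec_strip_links text out) := by unfold Spec_strip_links; infer_instance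

-- ===== CLAIM (what is proved, stated in full; the proofs are below) =====
def Claim_equal_strip_links : Prop := ∀ (text : String), Dom_strip_links text → Spec_strip_links text (strip_links text)

-- ===== LEMMAS AND PROOFS =====

-- recurrence satisfied by Source B's table f (self-referential; entries above p are final)
def RecF (cs : List Char) (a : List (Option Nat)) : Prop :=
  a.length = cs.length + 1 ∧ a[cs.length]! = none ∧
  ∀ p, p < cs.length → a[p]! = rhsF cs a p

def RangeF (cs : List Char) (a : List (Option Nat)) : Prop :=
  ∀ p q, a[p]! = some q → p ≤ q ∧ q < cs.length ∧ cs[q]! = ')'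

theorem g_oob {α : Type} [Inhabited α] (a : List α) (j : Nat) (h : a.length ≤ j) :
    a[j]! = (default : α) := by
  simp [List.getElem!_eq_getElem?_getD, List.getElem?_eq_none h]

theorem gset_ne {α : Type} [Inhabited α] (a : List α) (i j : Nat) (v : α) (h : i ≠ j) :
    (a.set i v)[j]! = a[j]! := by
  simp [List.getElem!_eq_getElem?_getD, List.getElem?_set_ne h]

theorem gset_self {α : Type} [Inhabited α] (a : List α) (i : Nat) (v : α) (h : i < a.length) :
    (a.set i v)[i]! = v := by
  simp [List.getElem!_eq_getElem?_getD, List.getElem?_set_self h]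

theorem grep (n p : Nat) : (List.replicate n (none : Option Nat))[p]! = none := by
  simp [List.getElem!_eq_getElem?_getD, List.getElem?_replicate]
  split <;> rfl

theorem take2_iff (cs : List Char) (m : Nat) :
    ((cs.drop m).take 2 = [']', '(']) ↔ (m + 1 < cs.length ∧ cs[m]! = ']' ∧ cs[m+1]! = '(') := by
  by_cases h : m + 1 < cs.length
  · have hm : m < cs.length := by omega
    have e1 : cs[m]! = cs[m] := by
      simp [List.getElem!_eq_getElem?_getD, List.getElem?_eq_getElem hm]
    have e2 : cs[m+1]! = cs[m+1] := by
      simp [List.getElem!_eq_getElem?_getD, List.getElem?_eq_getElem h]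
    have hd : (cs.drop m).take 2 = [cs[m], cs[m+1]] := by
      rw [List.drop_eq_getElem_cons hm, List.drop_eq_getElem_cons (l := cs) h]
      simp only [List.take_succ_cons, List.take_zero]
    rw [hd, e1, e2]
    simp [h]
  · constructor
    · intro he
      have := congrArg List.length he
      simp [List.length_take, List.length_drop] at this
      omega
    · intro he; exact absurd he.1 h

theorem findJB_none (cs : List Char) (p : Nat) (h : ¬ p + 1 < cs.length) : findJB cs p = none := by
  rw [findJB]; simp [h]

theorem nxt_fold (cs : List Char) : ∀ m, m ≤ cs.length →
    ∀ a0 : List (Option Nat), a0.length = cs.length + 1 →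
    (∀ p, m ≤ p → a0[p]! = findJB cs p) →
    ∀ p, (((List.range m).reverse).foldl
      (fun a p => a.set p (if (cs.drop p).take 2 = [']', '('] then some p else a[p+1]!)) a0)[p]!
      = findJB cs p := by
  intro m
  induction m with
  | zero => intro _ a0 _ h2 p; simpa using h2 p (Nat.zero_le p)
  | succ m ih =>
    intro hm a0 hlen h2 p
    rw [List.range_succ, List.reverse_append]
    simp only [List.reverse_cons, List.reverse_nil, List.nil_append, List.singleton_append,
      List.foldl_cons]
    apply ih (by omega) _ (by simp [hlen])
    intro p hp
    by_cases hpm : p = m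
    · subst hpm
      rw [gset_self _ _ _ (by omega)]
      by_cases hb : p + 1 < cs.length
      · rw [findJB]
        rw [dif_pos hb]
        by_cases hc : cs[p]! = ']' ∧ cs[p+1]! = '('
        · rw [if_pos ((take2_iff cs p).2 ⟨hb, hc.1, hc.2⟩), if_pos hc]
        · rw [if_neg (by rw [take2_iff]; tauto), if_neg hc]
          exact h2 (p+1) (by omega)
      · rw [if_neg (by rw [take2_iff]; tauto), findJB_none cs p hb,
          h2 (p+1) (by omega), findJB_none cs (p+1) (by omega)]
    · rw [gset_ne _ _ _ _ (Ne.symm hpm)]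
      exact h2 p (by omega)

theorem bNxt_spec (cs : List Char) : ∀ p, (bNxt cs)[p]! = findJB cs p := by
  apply nxt_fold cs cs.length le_rfl _ (by simp)
  intro p hp
  rw [grep, findJB_none cs p (by omega)]

-- invariant carried by Source B's second loop: entries at indices ≥ m are final
def InvF (cs : List Char) (m : Nat) (a : List (Option Nat)) : Prop :=
  a.length = cs.length + 1 ∧
  (∀ p, cs.length ≤ p → a[p]! = none) ∧
  (∀ p, m ≤ p → p < cs.length → a[p]! = rhsF cs a p) ∧
  (∀ p q, m ≤ p → a[p]! = some q → p ≤ q ∧ q < cs.length ∧ cs[q]! = ')')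

theorem rhsF_congr (cs : List Char) (x y : List (Option Nat)) (p : Nat)
    (h1 : x[p+1]! = y[p+1]!) (h2 : ∀ k, y[p+1]! = some k → x[k+1]! = y[k+1]!) :
    rhsF cs x p = rhsF cs y p := by
  unfold rhsF
  rw [h1]
  cases hk : y[p+1]! with
  | none => simp
  | some k =>
    by_cases c1 : cs[p]! = ')'
    · simp only [if_pos c1]
    · by_cases c2 : cs[p]! = '('
      · simp only [if_neg c1, if_pos c2]
        exact h2 k hk
      · simp only [if_neg c1, if_neg c2]

theorem f_step (cs : List Char) (m : Nat) (hm : m < cs.length) (a0 : List (Option Nat))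
    (h : InvF cs (m+1) a0) : InvF cs m (a0.set m (rhsF cs a0 m)) := by
  obtain ⟨hlen, hnone, hrec, hrange⟩ := h
  have hset : ∀ j, j ≠ m → (a0.set m (rhsF cs a0 m))[j]! = a0[j]! := by
    intro j hj; exact gset_ne _ _ _ _ (Ne.symm hj)
  have hself : (a0.set m (rhsF cs a0 m))[m]! = rhsF cs a0 m :=
    gset_self _ _ _ (by omega)
  refine ⟨by simp [hlen], ?_, ?_, ?_⟩
  · intro p hp; rw [hset p (by omega)]; exact hnone p hp
  · intro p hpm hpn
    by_cases hpm' : p = m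
    · subst hpm'
      rw [hself]
      refine Eq.symm (rhsF_congr cs _ a0 p (hset (p+1) (by omega)) ?_)
      intro k hk
      have := hrange (p+1) k le_rfl hk
      exact hset (k+1) (by omega)
    · rw [hset p hpm', hrec p (by omega) hpn]
      refine rhsF_congr cs a0 _ p (hset (p+1) (by omega)).symm ?_
      intro k hk
      rw [hset (p+1) (by omega)] at hk
      have := hrange (p+1) k (by omega) hk
      exact (hset (k+1) (by omega)).symm
  · intro p q hpm hq
    by_cases hpm' : p = m
    · subst hpm'
      rw [hself] at hq
      unfold rhsF at hq
      split_ifs at hq with c1 c2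
      · cases hq; exact ⟨le_rfl, hm, c1⟩
      · cases hk : a0[p+1]! with
        | none => rw [hk] at hq; simp at hq
        | some k =>
          rw [hk] at hq; simp only [] at hq
          have h1 := hrange (p+1) k le_rfl hk
          have h2 := hrange (k+1) q (by omega) hq
          exact ⟨by omega, h2.2.1, h2.2.2⟩
      · have := hrange (p+1) q le_rfl hq
        exact ⟨by omega, this.2.1, this.2.2⟩
    · rw [hset p hpm'] at hq
      have := hrange p q (by omega) hq
      exact ⟨this.1, this.2.1, this.2.2⟩

theorem f_fold (cs : List Char) : ∀ m, m ≤ cs.length →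
    ∀ a0 : List (Option Nat), InvF cs m a0 →
    InvF cs 0 (((List.range m).reverse).foldl (fun a p => a.set p (rhsF cs a p)) a0) := by
  intro m
  induction m with
  | zero => intro _ a0 h; simpa using h
  | succ m ih =>
    intro hm a0 h
    rw [List.range_succ, List.reverse_append]
    simp only [List.reverse_cons, List.reverse_nil, List.nil_append, List.singleton_append,
      List.foldl_cons]
    exact ih (by omega) _ (f_step cs m (by omega) a0 h)

theorem bF_rec (cs : List Char) : RecF cs (bF cs) ∧ RangeF cs (bF cs) := by
  have init : InvF cs cs.length (List.replicate (cs.length + 1) none) := by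
    refine ⟨by simp, fun p _ => grep _ _, fun p hp hpn => absurd hpn (by omega), ?_⟩
    intro p q _ hq; rw [grep] at hq; cases hq
  have h := f_fold cs cs.length le_rfl _ init
  obtain ⟨hlen, hnone, hrec, hrange⟩ := h
  exact ⟨⟨hlen, hnone cs.length le_rfl, fun p hp => hrec p (Nat.zero_le p) hp⟩,
    fun p q hq => hrange p q (Nat.zero_le p) hq⟩

theorem dl_stop (cs : List Char) (p : Nat) (d : Int) (h : ¬ (p < cs.length ∧ 0 < d)) :
    depthLoop cs p d = (p, d) := by
  rw [depthLoop]; rw [dif_neg h]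

theorem dl_open (cs : List Char) (p : Nat) (d : Int) (hp : p < cs.length)
    (hc : cs[p]! = '(') (hd : 0 < d) : depthLoop cs p d = depthLoop cs (p+1) (d+1) := by
  rw [depthLoop]; rw [dif_pos ⟨hp, hd⟩]; simp [hc]

theorem dl_close (cs : List Char) (p : Nat) (d : Int) (hp : p < cs.length)
    (hc : cs[p]! = ')') (hd : 0 < d) : depthLoop cs p d = depthLoop cs (p+1) (d-1) := by
  rw [depthLoop]; rw [dif_pos ⟨hp, hd⟩]
  have : cs[p]! ≠ '(' := by rw [hc]; decide
  simp [hc, this]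

theorem dl_other (cs : List Char) (p : Nat) (d : Int) (hp : p < cs.length)
    (h1 : cs[p]! ≠ '(') (h2 : cs[p]! ≠ ')') (hd : 0 < d) :
    depthLoop cs p d = depthLoop cs (p+1) d := by
  rw [depthLoop]; rw [dif_pos ⟨hp, hd⟩, if_neg h1, if_neg h2]

theorem depth_main (cs : List Char) (a : List (Option Nat))
    (hrec : RecF cs a) (hrange : RangeF cs a) :
    ∀ k p, cs.length - p = k →
      (∀ q, a[p]! = some q → ∀ d : Int, 0 ≤ d → depthLoop cs p (d+1) = depthLoop cs (q+1) d)
      ∧ (a[p]! = none → ∀ d : Int, 1 ≤ d → 0 < (depthLoop cs p d).2) := by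
  obtain ⟨hlen, hend, hr⟩ := hrec
  intro k
  induction k using Nat.strong_induction_on with
  | _ k IH =>
    intro p hk
    by_cases hp : p < cs.length
    · have hrp := hr p hp
      by_cases c1 : cs[p]! = ')'
      · rw [rhsF, if_pos c1] at hrp
        constructor
        · intro q hq d hd
          rw [hrp] at hq
          cases hq
          rw [dl_close cs p (d+1) hp c1 (by omega)]
          norm_num
        · intro hq; rw [hrp] at hq; cases hq
      · by_cases c2 : cs[p]! = '('
        · rw [rhsF, if_neg c1, if_pos c2] at hrp
          have IH1 := IH (cs.length - (p+1)) (by omega) (p+1) rfl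
          cases hk1 : a[p+1]! with
          | some k1 =>
            rw [hk1] at hrp
            simp only [] at hrp
            have hkb := hrange (p+1) k1 hk1
            have IH2 := IH (cs.length - (k1+1)) (by omega) (k1+1) rfl
            constructor
            · intro q hq d hd
              rw [hrp] at hq
              calc depthLoop cs p (d+1) = depthLoop cs (p+1) (d+1+1) :=
                    dl_open cs p (d+1) hp c2 (by omega)
                _ = depthLoop cs (k1+1) (d+1) := IH1.1 k1 hk1 (d+1) (by omega)
                _ = depthLoop cs (q+1) d := IH2.1 q hq d hd
            · intro hq d hd
              rw [hrp] at hq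
              rw [dl_open cs p d hp c2 (by omega), IH1.1 k1 hk1 d (by omega)]
              exact IH2.2 hq d hd
          | none =>
            rw [hk1] at hrp
            simp only [] at hrp
            constructor
            · intro q hq; rw [hrp] at hq; cases hq
            · intro _ d hd
              rw [dl_open cs p d hp c2 (by omega)]
              exact IH1.2 hk1 (d+1) (by omega)
        · rw [rhsF, if_neg c1, if_neg c2] at hrp
          have IH1 := IH (cs.length - (p+1)) (by omega) (p+1) rfl
          constructor
          · intro q hq d hd
            rw [hrp] at hq
            rw [dl_other cs p (d+1) hp c2 c1 (by omega)]
            exact IH1.1 q hq d hd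
          · intro hq d hd
            rw [hrp] at hq
            rw [dl_other cs p d hp c2 c1 (by omega)]
            exact IH1.2 hq d hd
    · have ha : a[p]! = none := by
        by_cases hpe : p = cs.length
        · subst hpe; exact hend
        · exact g_oob a p (by omega)
      constructor
      · intro q hq; rw [ha] at hq; cases hq
      · intro _ d hd
        rw [dl_stop cs p d (by omega)]
        simpa using hd

theorem findJB_ge (cs : List Char) (q le : Nat) (h : findJB cs q = some le) : q ≤ le := by
  fun_induction findJB cs q with
  | case1 q h1 h2 => simp_all
  | case2 q h1 h2 ih => have := ih (by simpa using h); omega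
  | case3 q h1 => simp_all

theorem loops_eq (cs : List Char) (nxt f : List (Option Nat))
    (hn : ∀ p, nxt[p]! = findJB cs p) (hrec : RecF cs f) (hrange : RangeF cs f) :
    ∀ fuel i acc, cs.length - i ≤ fuel → aLoop cs fuel i acc = bLoop cs nxt f fuel i acc := by
  intro fuel
  induction fuel with
  | zero => intro i acc hle; rfl
  | succ fuel ih =>
    intro i acc hle
    rw [aLoop, bLoop]
    by_cases hi : i < cs.length
    · rw [if_pos hi, if_pos hi]
      by_cases hc : cs[i]! = '['
      · rw [if_pos hc, if_pos hc, hn i]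
        cases hfe : findJB cs i with
        | some le =>
          have hge := findJB_ge cs i le hfe
          simp only []
          cases hf2 : f[le+2]! with
          | some m =>
            have hmb := hrange (le+2) m hf2
            have hdl : depthLoop cs (le+2) 1 = (m+1, 0) := by
              have h1 := (depth_main cs f hrec hrange (cs.length - (le+2)) (le+2) rfl).1
                m hf2 0 le_rfl
              rw [dl_stop cs (m+1) 0 (by omega)] at h1
              simpa using h1
            rw [hdl]
            simp only [reduceIte]
            exact ih (m+1) _ (by omega)
          | none =>
            have hnz : ¬ (depthLoop cs (le+2) 1).2 = 0 := by
              have h1 := (depth_main cs f hrec hrange (cs.length - (le+2)) (le+2) rfl).2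
                hf2 1 le_rfl
              omega
            rw [if_neg hnz]
            exact ih (i+1) _ (by omega)
        | none =>
          simp only []
          exact ih (i+1) _ (by omega)
      · rw [if_neg hc, if_neg hc]
        exact ih (i+1) _ (by omega)
    · rw [if_neg hi, if_neg hi]

-- ===== VERDICT (by name: the statement is the Claim_ definition above) =====
theorem strip_links_spec : Claim_equal_strip_links := by
  intro text _
  unfold Spec_strip_links strip_links strip_links_alt
  have ⟨hrec, hrange⟩ := bF_rec text.toList
  exact congrArg String.ofList (loops_eq text.toList _ _ (bNxt_spec text.toList) hrec hrange _ 0 [] (by omega))
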